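-- pv_equiv track=rewrite | github.com/rezamatin1290/test | api.py | is_infix
-- ===== SOURCE A (Python) =====
-- def is_infix(a):
--     operator = ["*", "/", "-", "+", "^"]
--
--     if a[0] in operator or a[-1] in operator:return False
--
--     flag = 0
--     for x in range(len(a)-1):
--         if flag == 0:
--             if not a[x+1] in operator:return False
--             else: flag = 1
--         elif flag  == 1:
--             if  a[x+1] in operator:return False
--             else: flag = 0
--
--     return True
-- ===== SOURCE B (Python) =====
-- def is_infix(a):
--     operator = ["*", "/", "-", "+", "^"]
--     if a[0] in operator:
--         return False
--     i = 1
--     n = len(a)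
--     while i < n:
--         if i + 1 >= n or a[i] not in operator or a[i + 1] in operator:
--             return False
--         i += 2
--     return True
-- ===== Notes on version B (the rewrite author's own statement) =====
-- stated objective: alternative
-- what changed: A's flag state-machine walks index by index toggling expected/not-expected operator; B is a grammar-style pair-consuming cursor: after rejecting an operator head it advances two tokens at a time, demanding each step consume one operator then one operand, with no state flag and no a[-1] endpoint check (the pair structure subsumes it).
import Mathlib
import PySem

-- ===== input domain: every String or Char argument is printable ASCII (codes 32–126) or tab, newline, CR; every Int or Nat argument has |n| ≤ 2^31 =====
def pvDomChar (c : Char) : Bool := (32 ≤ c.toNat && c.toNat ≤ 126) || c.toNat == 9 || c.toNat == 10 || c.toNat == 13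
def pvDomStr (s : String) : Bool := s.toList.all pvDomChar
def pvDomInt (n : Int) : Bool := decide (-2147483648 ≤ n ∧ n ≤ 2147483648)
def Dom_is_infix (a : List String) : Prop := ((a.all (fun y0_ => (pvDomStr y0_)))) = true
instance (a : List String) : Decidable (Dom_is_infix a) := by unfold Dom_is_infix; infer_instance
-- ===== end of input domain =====

-- B replaces A's flag state-machine with a pair-consuming cursor (grammar: operand (operator operand)*); objective: alternative, same cost.

-- ===== PORT A =====
-- the 'for x in range(len(a)-1)' loop with its flag state and early returns
def isInfixLoopA (a op : List String) : List Int → Int → Bool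
  | [], _ => true
  | x :: xs, flag =>
    if flag = 0 then
      if ¬ op.contains (PySem.List.pyGetD a (x + 1) "") then false
      else isInfixLoopA a op xs 1
    else if flag = 1 then
      if op.contains (PySem.List.pyGetD a (x + 1) "") then false
      else isInfixLoopA a op xs 0
    else isInfixLoopA a op xs flag

def is_infix (a : List String) : Bool :=
  let operator : List String := ["*", "/", "-", "+", "^"]
  -- a[0] / a[-1]: in range for every a admitted by Pre_ (a ≠ []); pyGetD is exact there
  if operator.contains (PySem.List.pyGetD a 0 "") || operator.contains (PySem.List.pyGetD a (-1) "") then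
    false
  else
    isInfixLoopA a operator (PySem.List.pyRange 0 ((a.length : Int) - 1) 1) 0

-- ===== PORT B =====
-- the 'while i < n' cursor loop of Source B, advancing two tokens per step
def isInfixLoopB (a op : List String) (i : Int) : Bool :=
  if i < (a.length : Int) then
    if (a.length : Int) ≤ i + 1 || !op.contains (PySem.List.pyGetD a i "") || op.contains (PySem.List.pyGetD a (i + 1) "") then
      false
    else
      isInfixLoopB a op (i + 2)
  else true
termination_by ((a.length : Int) - i).toNat
decreasing_by omega

def is_infix_alt (a : List String) : Bool :=
  let operator : List String := ["*", "/", "-", "+", "^"]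
  if operator.contains (PySem.List.pyGetD a 0 "") then false
  else isInfixLoopB a operator 1

-- ===== PRECONDITION & SPEC =====
-- Pre_ excludes only the empty list, on which Python A raises IndexError at a[0] (B raises there too).
def Pre_is_infix (a : List String) : Prop := a ≠ []
instance (a : List String) : Decidable (Pre_is_infix a) := by unfold Pre_is_infix; infer_instance
def pvWitness_is_infix : List String := ["1", "+", "2"]

def Spec_is_infix (a : List String) (out : Bool) : Prop := out = is_infix_alt a
instance (a : List String) (out : Bool) : Decidable (Spec_is_infix a out) := by unfold Spec_is_infix; infer_instance

-- ===== CLAIM (what is proved, stated in full; the proofs are below) =====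
def Claim_equal_is_infix : Prop := ∀ (a : List String), Dom_is_infix a → Pre_is_infix a → Spec_is_infix a (is_infix a)

-- ===== LEMMAS AND PROOFS =====

-- "expected alternation" check for A: exp says whether the head must be an operator
def chkAlt (op : List String) : List String → Bool → Bool
  | [], _ => true
  | c :: t, exp => (op.contains c == exp) && chkAlt op t (!exp)

-- structural meaning of B's cursor loop: consume (operator, operand) pairs
def pairsSem (op : List String) : List String → Bool
  | [] => true
  | [_] => false
  | x :: y :: t => op.contains x && !op.contains y && pairsSem op t

theorem loopA_eq_chkAlt (op a : List String) :
    ∀ (m k : Nat) (exp : Bool), k + 1 + m = a.length →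
      isInfixLoopA a op ((List.range' k m).map (fun (i : Nat) => (i : Int))) (cond exp 0 1)
        = chkAlt op (a.drop (k + 1)) exp := by
  intro m
  induction m with
  | zero =>
    intro k exp h
    have hnil : a.drop (k + 1) = [] := by
      apply List.drop_eq_nil_of_le; omega
    cases exp <;> simp [hnil, isInfixLoopA, chkAlt]
  | succ m ih =>
    intro k exp h
    have hk : k + 1 < a.length := by omega
    have hdrop : a.drop (k + 1) = a[k + 1] :: a.drop (k + 2) := by
      rw [List.drop_eq_getElem_cons hk]
    have hget : PySem.List.pyGetD a ((k : Int) + 1) "" = a[k + 1] := by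
      have hcast : ((k : Int) + 1) = ((k + 1 : Nat) : Int) := by push_cast; ring
      rw [hcast, PySem.List.pyGetD_natCast, List.getD_eq_getElem?_getD, List.getElem?_eq_getElem hk]
      rfl
    have h2 : a.drop (k + 1 + 1) = a.drop (k + 2) := by norm_num
    rw [List.range'_succ, List.map_cons]
    cases exp with
    | true =>
      have hrec := ih (k + 1) false (by omega)
      simp only [cond] at hrec ⊢
      simp only [isInfixLoopA, hget, hdrop, chkAlt]
      by_cases hc : a[k + 1] ∈ op
      · simp [hc, hrec, h2]
      · simp [hc]
    | false =>
      have hrec := ih (k + 1) true (by omega)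
      simp only [cond] at hrec ⊢
      simp only [isInfixLoopA, if_neg (by norm_num : ¬ ((1 : Int) = 0)),
        hget, hdrop, chkAlt]
      by_cases hc : a[k + 1] ∈ op
      · simp [hc]
      · simp [hc, hrec, h2]

-- B's cursor from position k computes pairsSem of the suffix
theorem loopB_eq_pairsSem (a op : List String) :
    ∀ (m k : Nat), a.length - k ≤ m → isInfixLoopB a op (k : Int) = pairsSem op (a.drop k) := by
  intro m
  induction m with
  | zero =>
    intro k h
    rw [isInfixLoopB]
    have hge : a.length ≤ k := by omega
    rw [if_neg (by exact_mod_cast not_lt.mpr hge)]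
    rw [List.drop_eq_nil_of_le hge]
    rfl
  | succ m ih =>
    intro k h
    rw [isInfixLoopB]
    by_cases hk : k < a.length
    · rw [if_pos (by exact_mod_cast hk)]
      have hdrop : a.drop k = a[k] :: a.drop (k + 1) := List.drop_eq_getElem_cons hk
      have hgetk : PySem.List.pyGetD a (k : Int) "" = a[k] := by
        rw [PySem.List.pyGetD_natCast, List.getD_eq_getElem?_getD, List.getElem?_eq_getElem hk]; rfl
      by_cases hk1 : k + 1 < a.length
      · have hdrop1 : a.drop (k + 1) = a[k + 1] :: a.drop (k + 2) := List.drop_eq_getElem_cons hk1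
        have hgetk1 : PySem.List.pyGetD a ((k : Int) + 1) "" = a[k + 1] := by
          have hcast : ((k : Int) + 1) = ((k + 1 : Nat) : Int) := by push_cast; ring
          rw [hcast, PySem.List.pyGetD_natCast, List.getD_eq_getElem?_getD, List.getElem?_eq_getElem hk1]
          rfl
        have hnotle : ¬ ((a.length : Int) ≤ (k : Int) + 1) := by exact_mod_cast not_le.mpr hk1
        rw [hdrop, hdrop1]
        have hrec : isInfixLoopB a op ((k : Int) + 2) = pairsSem op (a.drop (k + 2)) := by
          rw [show ((k : Int) + 2) = ((k + 2 : Nat) : Int) by push_cast; ring]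
          exact ih (k + 2) (by omega)
        by_cases hx : a[k] ∈ op
        · by_cases hy : a[k + 1] ∈ op
          · simp [hgetk, hgetk1, hnotle, pairsSem, hx, hy]
          · simp [hgetk, hgetk1, hnotle, pairsSem, hx, hy, hrec]
        · simp [hgetk, hgetk1, hnotle, pairsSem, hx]
      · have hle : (a.length : Int) ≤ (k : Int) + 1 := by exact_mod_cast (by omega : a.length ≤ k + 1)
        have hdrop1 : a.drop (k + 1) = [] := List.drop_eq_nil_of_le (by omega)
        rw [hdrop, hdrop1]
        simp [hle, pairsSem]
    · rw [if_neg (by exact_mod_cast hk)]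
      rw [List.drop_eq_nil_of_le (by omega)]
      rfl

-- key bridge: endpoint guard + alternation (A's shape) equals pair consumption (B's shape)
theorem guard_chkAlt_eq_pairsSem (op : List String) :
    ∀ (t : List String) (x : String), op.contains x = false →
      (!op.contains (t.getLastD x) && chkAlt op t true) = pairsSem op t := by
  intro t
  induction t using pairsSem.induct with
  | case1 =>
    intro x hx
    have hx' : x ∉ op := by simpa using hx
    simp [chkAlt, pairsSem, hx']
  | case2 y =>
    intro x hx
    rw [List.getLastD_cons]
    simp only [List.getLastD_nil, chkAlt, pairsSem]
    cases op.contains y <;> simp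
  | case3 y z t ih =>
    intro x hx
    rw [List.getLastD_cons, List.getLastD_cons]
    by_cases hz : op.contains z = true
    · simp only [chkAlt, pairsSem, Bool.not_true, hz]
      simp
    · have hz' : op.contains z = false := eq_false_of_ne_true hz
      by_cases hy : op.contains y = true
      · have hih := ih z hz'
        simp only [chkAlt, pairsSem, Bool.not_true, hy, hz']
        rw [← hih]
        simp
      · have hy' : op.contains y = false := eq_false_of_ne_true hy
        simp only [chkAlt, pairsSem, Bool.not_true, hy', hz']
        simp

-- ===== VERDICT (by name: the statement is the Claim_ definition above) =====
theorem is_infix_spec : Claim_equal_is_infix := by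
  intro a _ hpre
  unfold Spec_is_infix is_infix is_infix_alt
  dsimp only
  obtain ⟨c, t, rfl⟩ : ∃ c t, a = c :: t := by
    cases a with
    | nil => exact absurd rfl hpre
    | cons c t => exact ⟨c, t, rfl⟩
  have hp0 : PySem.List.pyGetD (c :: t) 0 "" = c := by
    have h0 : ((0 : Int)) = ((0 : Nat) : Int) := rfl
    rw [h0, PySem.List.pyGetD_natCast]; rfl
  have hpl : PySem.List.pyGetD (c :: t) (-1) "" = t.getLastD c := by
    rw [PySem.List.pyGetD_neg_one (c :: t) "" (List.cons_ne_nil c t), List.getLast_eq_getLastD]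
  rw [hp0, hpl]
  have hB : isInfixLoopB (c :: t) (["*", "/", "-", "+", "^"]) 1
      = pairsSem (["*", "/", "-", "+", "^"]) t := by
    have h1 : ((1 : Int)) = ((1 : Nat) : Int) := rfl
    rw [h1, loopB_eq_pairsSem (c :: t) (["*", "/", "-", "+", "^"]) (c :: t).length 1 (by omega)]
    rfl
  by_cases hc : (["*", "/", "-", "+", "^"] : List String).contains c = true
  · rw [if_pos (by rw [hc]; rfl), if_pos hc]
  · have hc' : (["*", "/", "-", "+", "^"] : List String).contains c = false :=
      eq_false_of_ne_true hc
    have hP := guard_chkAlt_eq_pairsSem (["*", "/", "-", "+", "^"]) t c hc'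
    by_cases hl : (["*", "/", "-", "+", "^"] : List String).contains (t.getLastD c) = true
    · rw [if_pos (by rw [hl]; simp), if_neg (by rw [hc']; simp)]
      rw [hB, ← hP, hl]
      rfl
    · have hl' : (["*", "/", "-", "+", "^"] : List String).contains (t.getLastD c) = false :=
        eq_false_of_ne_true hl
      rw [if_neg (by rw [hc', hl']; simp), if_neg (by rw [hc']; simp)]
      have hlen : (((c :: t).length : Int) - 1) = (t.length : Int) := by simp
      rw [hlen, PySem.List.pyRange_zero_natCast, List.range_eq_range']
      have hA := loopA_eq_chkAlt (["*", "/", "-", "+", "^"]) (c :: t) t.length 0 true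
        (by simp only [List.length_cons]; omega)
      simp only [cond] at hA
      rw [hA, hB, ← hP, hl']
      simp
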